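-- pv_equiv track=rewrite | github.com/elizabeth-van-itallie/phospho_matching | scripts/step2_match.py | make_motifs_dict
-- ===== SOURCE A (Python) =====
-- def make_motifs_dict(fasta_dict, phospho_dict):
--
--     motif_dict = {}
--
--     for seq_id, phos_refs in phospho_dict.items():
--         motif_dict[seq_id] = {}
--
--         for p_str in phos_refs:
--             p = int(p_str)-1
--             s_pad_mot = ''
--             e_pad_mot = ''
--             ref_len = len(fasta_dict[seq_id])
--
--             start = max(p-6,0)
--             if (start == 0):
--                 s_pad_mot = 'x'*(6-p)
--
--             end = min(p+7,ref_len)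
--             if (end-p < 7):
--                 e_pad_mot = 'x'*(6-(end-p-1))
--
--             # find the sequence part of the motif from the input reference
--             mot_seq = fasta_dict[seq_id][start:end]
--
--             # combine the AAs and the padding for final motif
--             motif_dict[seq_id][p_str] = s_pad_mot + mot_seq + e_pad_mot
--
--     return motif_dict
-- ===== SOURCE B (Python) =====
-- def make_motifs_dict(fasta_dict, phospho_dict):
--     motif_dict = {}
--     for seq_id, phos_refs in phospho_dict.items():
--         motifs = {}
--         for p_str in phos_refs:
--             ref = fasta_dict[seq_id]
--             n = len(ref)
--             p = int(p_str) - 1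
--             motifs[p_str] = ''.join(ref[j] if 0 <= j < n else 'x'
--                                     for j in range(p - 6, p + 7))
--         motif_dict[seq_id] = motifs
--     return motif_dict
-- ===== Notes on version B (the rewrite author's own statement) =====
-- stated objective: simpler
-- what changed: Replaces A's slice-plus-two-conditionally-computed-padding-strings construction by a single bounds-checked comprehension over the 13 window indices range(p-6,p+7), emitting the reference character when the index is in range and 'x' otherwise.
-- intended difference: On inputs where some phospho position parses to v with v <= -7 or v >= len(reference)+8, A's padding arithmetic and negative-stop slice return an over-long motif string (> 13 chars, e.g. 'x'*16), while B returns the intended fixed-width 13-character x-padded motif. — e.g. on make_motifs_dict([("a", "AC")], [("a", ["12"])]): A returns [("a", [("12", "xxxxxxxxxxxxxxxx")])], B returns [("a", [("12", "xxxxxxxxxxxxx")])]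
import Mathlib
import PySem

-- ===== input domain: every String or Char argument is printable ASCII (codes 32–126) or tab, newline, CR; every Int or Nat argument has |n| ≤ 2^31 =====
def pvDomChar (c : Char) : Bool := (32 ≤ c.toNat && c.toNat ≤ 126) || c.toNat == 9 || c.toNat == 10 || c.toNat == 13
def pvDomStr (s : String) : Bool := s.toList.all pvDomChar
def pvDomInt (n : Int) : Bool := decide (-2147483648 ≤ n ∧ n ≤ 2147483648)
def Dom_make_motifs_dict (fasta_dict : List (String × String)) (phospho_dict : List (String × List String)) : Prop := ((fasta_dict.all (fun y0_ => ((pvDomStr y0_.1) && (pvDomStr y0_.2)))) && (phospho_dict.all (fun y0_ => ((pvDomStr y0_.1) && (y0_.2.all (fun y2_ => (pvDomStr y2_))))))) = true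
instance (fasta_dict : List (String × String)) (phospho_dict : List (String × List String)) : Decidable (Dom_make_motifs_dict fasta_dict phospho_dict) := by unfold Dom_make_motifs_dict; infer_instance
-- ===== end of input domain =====

-- B replaces A's slice-plus-computed-padding construction by a single bounds-checked
-- per-index window traversal (objective: simpler); on out-of-window phospho positions
-- (int(p_str) ≤ -7 or ≥ len(ref)+8) A's padding arithmetic returns over-long strings
-- while B returns the intended fixed-width 13-char motif (see D_ below).

-- ===== PORT A =====
-- per-position motif exactly as A computes it: two conditional pads + a slice
def pvMotifA (seq : List Char) (p : Int) : List Char :=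
  let ref_len : Int := seq.length
  let start : Int := max (p - 6) 0
  let s_pad_mot : List Char := if start = 0 then PySem.List.pyRepeat ['x'] (6 - p) else []
  let e : Int := min (p + 7) ref_len
  let e_pad_mot : List Char := if e - p < 7 then PySem.List.pyRepeat ['x'] (6 - (e - p - 1)) else []
  let mot_seq := PySem.List.slice seq (some start) (some e)
  s_pad_mot ++ mot_seq ++ e_pad_mot

def make_motifs_dict (fasta_dict : List (String × String)) (phospho_dict : List (String × List String)) : List (String × List (String × String)) :=
  let fd := PySem.Dict.ofList fasta_dict
  let motif_dict : PySem.Dict String (PySem.Dict String String) :=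
    (PySem.Dict.ofList phospho_dict).items.foldl
      (fun md kv =>
        kv.2.foldl
          (fun md p_str =>
            let p : Int := (PySem.Int.ofStr? p_str).getD 0 - 1
            let seq := (fd.getD kv.1 "").toList
            md.modify kv.1 PySem.Dict.empty
              (fun inner => inner.insert p_str (String.ofList (pvMotifA seq p))))
          (md.insert kv.1 PySem.Dict.empty))
      PySem.Dict.empty
  motif_dict.items.map (fun kv => (kv.1, kv.2.items))

-- ===== PORT B =====
-- per-position motif as B computes it: one bounds-checked pass over the 13 window indices
def pvMotifB (seq : List Char) (p : Int) : List Char :=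
  (PySem.List.pyRange (p - 6) (p + 7) 1).map
    (fun j => if 0 ≤ j ∧ j < (seq.length : Int) then (PySem.List.pyGet? seq j).getD 'x' else 'x')

def make_motifs_dict_alt (fasta_dict : List (String × String)) (phospho_dict : List (String × List String)) : List (String × List (String × String)) :=
  let fd := PySem.Dict.ofList fasta_dict
  let motif_dict : PySem.Dict String (PySem.Dict String String) :=
    (PySem.Dict.ofList phospho_dict).items.foldl
      (fun md kv =>
        md.insert kv.1
          (kv.2.foldl
            (fun motifs p_str =>
              let seq := (fd.getD kv.1 "").toList
              let p : Int := (PySem.Int.ofStr? p_str).getD 0 - 1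
              motifs.insert p_str (String.ofList (pvMotifB seq p)))
            PySem.Dict.empty))
      PySem.Dict.empty
  motif_dict.items.map (fun kv => (kv.1, kv.2.items))

-- ===== PRECONDITION & SPEC =====
-- a phospho ref is processable: its seq_id is a fasta key (no KeyError) and it parses as int (no ValueError)
def pvOkRef (fd : PySem.Dict String String) (k : String) (s : String) : Bool :=
  fd.contains k && (PySem.Int.ofStr? s).isSome

-- Pre_ = exactly the inputs on which A returns normally: every ref of every phospho item
-- has its seq_id present in fasta_dict and parses as a Python int
def pvPreCheck (fasta_dict : List (String × String)) (phospho_dict : List (String × List String)) : Bool :=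
  (PySem.Dict.ofList phospho_dict).items.all fun kv =>
    kv.2.all fun s => pvOkRef (PySem.Dict.ofList fasta_dict) kv.1 s
def Pre_make_motifs_dict (fasta_dict : List (String × String)) (phospho_dict : List (String × List String)) : Prop :=
  pvPreCheck fasta_dict phospho_dict = true
instance (fasta_dict : List (String × String)) (phospho_dict : List (String × List String)) : Decidable (Pre_make_motifs_dict fasta_dict phospho_dict) := by unfold Pre_make_motifs_dict; infer_instance

def pvWitness_make_motifs_dict : (List (String × String)) × (List (String × List String)) :=
  ([("a", "ACDEFGH")], [("a", ["3"])])

-- a phospho position is out of window: it parses to v with v ≤ -7 or v ≥ len(ref)+8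
def pvBadPos (fd : PySem.Dict String String) (k : String) (s : String) : Bool :=
  fd.contains k &&
    (match PySem.Int.ofStr? s with
     | none => false
     | some v => decide (v ≤ -7) || decide (((fd.getD k "").toList.length : Int) + 8 ≤ v))

-- On inputs with some phospho position int(p_str) ≤ -7 or ≥ len(reference)+8, A's padding
-- arithmetic and negative-stop slice return an over-long (> 13 chars) motif string, while B
-- returns the intended fixed-width 13-character x-padded motif.
def pvDCheck (fasta_dict : List (String × String)) (phospho_dict : List (String × List String)) : Bool :=
  (PySem.Dict.ofList phospho_dict).items.any fun kv =>
    kv.2.any fun s => pvBadPos (PySem.Dict.ofList fasta_dict) kv.1 s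
def D_make_motifs_dict (fasta_dict : List (String × String)) (phospho_dict : List (String × List String)) : Prop :=
  pvDCheck fasta_dict phospho_dict = true
instance (fasta_dict : List (String × String)) (phospho_dict : List (String × List String)) : Decidable (D_make_motifs_dict fasta_dict phospho_dict) := by unfold D_make_motifs_dict; infer_instance

def Spec_make_motifs_dict (fasta_dict : List (String × String)) (phospho_dict : List (String × List String)) (out : List (String × List (String × String))) : Prop := ¬ D_make_motifs_dict fasta_dict phospho_dict → out = make_motifs_dict_alt fasta_dict phospho_dict
instance (fasta_dict : List (String × String)) (phospho_dict : List (String × List String)) (out : List (String × List (String × String))) : Decidable (Spec_make_motifs_dict fasta_dict phospho_dict out) := by unfold Spec_make_motifs_dict; infer_instance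

def pvDiffWitness_make_motifs_dict : (List (String × String)) × (List (String × List String)) :=
  ([("a", "AC")], [("a", ["12"])])
def pvDiffWitnessOut_make_motifs_dict : (List (String × List (String × String))) × (List (String × List (String × String))) :=
  ([("a", [("12", "xxxxxxxxxxxxxxxx")])], [("a", [("12", "xxxxxxxxxxxxx")])])

-- ===== CLAIM (what is proved, stated in full; the proofs are below) =====
def Claim_unchanged_make_motifs_dict : Prop := ∀ (fasta_dict : List (String × String)) (phospho_dict : List (String × List String)), Dom_make_motifs_dict fasta_dict phospho_dict → Pre_make_motifs_dict fasta_dict phospho_dict → Spec_make_motifs_dict fasta_dict phospho_dict (make_motifs_dict fasta_dict phospho_dict)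
def Claim_changed_make_motifs_dict : Prop := Dom_make_motifs_dict (pvDiffWitness_make_motifs_dict.1) (pvDiffWitness_make_motifs_dict.2) ∧ Pre_make_motifs_dict (pvDiffWitness_make_motifs_dict.1) (pvDiffWitness_make_motifs_dict.2) ∧ D_make_motifs_dict (pvDiffWitness_make_motifs_dict.1) (pvDiffWitness_make_motifs_dict.2) ∧ make_motifs_dict (pvDiffWitness_make_motifs_dict.1) (pvDiffWitness_make_motifs_dict.2) = pvDiffWitnessOut_make_motifs_dict.1 ∧ make_motifs_dict_alt (pvDiffWitness_make_motifs_dict.1) (pvDiffWitness_make_motifs_dict.2) = pvDiffWitnessOut_make_motifs_dict.2 ∧ pvDiffWitnessOut_make_motifs_dict.1 ≠ pvDiffWitnessOut_make_motifs_dict.2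

def Claim_exact_make_motifs_dict : Prop := ∀ (fasta_dict : List (String × String)) (phospho_dict : List (String × List String)), Dom_make_motifs_dict fasta_dict phospho_dict → Pre_make_motifs_dict fasta_dict phospho_dict → D_make_motifs_dict fasta_dict phospho_dict → make_motifs_dict fasta_dict phospho_dict ≠ make_motifs_dict_alt fasta_dict phospho_dict

-- ===== LEMMAS AND PROOFS =====

-- B's window map splits into front padding ++ in-range slice ++ back padding (any window [a,b))
lemma pvWindow_split (seq : List Char) (a b : Int) :
    (PySem.List.pyRange a b 1).map
      (fun j => if 0 ≤ j ∧ j < (seq.length : Int) then (PySem.List.pyGet? seq j).getD 'x' else 'x')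
    = List.replicate (min b 0 - a).toNat 'x'
      ++ (seq.drop (max a 0).toNat).take (min b (seq.length : Int) - max a 0).toNat
      ++ List.replicate (b - max a (seq.length : Int)).toNat 'x' := by
  have hL : (0 : Int) ≤ (seq.length : Int) := Int.natCast_nonneg _
  induction hn : (b - a).toNat generalizing a with
  | zero =>
    have hba : b ≤ a := by omega
    rw [PySem.List.pyRange_one_eq_nil hba, List.map_nil]
    have h1 : (min b 0 - a).toNat = 0 := by omega
    have h2 : (min b (seq.length : Int) - max a 0).toNat = 0 := by omega
    have h3 : (b - max a (seq.length : Int)).toNat = 0 := by omega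
    simp [h1, h2, h3]
  | succ n ih =>
    have hab : a < b := by omega
    rw [PySem.List.pyRange_one_cons hab, List.map_cons, ih (a + 1) (by omega)]
    by_cases ha0 : a < 0
    · have hif : ¬(0 ≤ a ∧ a < (seq.length : Int)) := by omega
      rw [if_neg hif]
      have hfront : (min b 0 - a).toNat = (min b 0 - (a + 1)).toNat + 1 := by omega
      have hmid : max (a + 1) 0 = max a 0 := by omega
      have hback : max (a + 1) (seq.length : Int) = max a (seq.length : Int) := by omega
      rw [hmid, hback, hfront, List.replicate_succ]
      simp
    · rcases Int.eq_ofNat_of_zero_le (by omega : (0 : Int) ≤ a) with ⟨k, rfl⟩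
      by_cases hkL : k < seq.length
      · have hif : 0 ≤ (k : Int) ∧ (k : Int) < (seq.length : Int) := by
          exact ⟨by positivity, by exact_mod_cast hkL⟩
        rw [if_pos hif, PySem.List.pyGet?_natCast]
        have hget : seq[k]?.getD 'x' = seq[k] := by
          rw [List.getElem?_eq_getElem hkL]; rfl
        rw [hget]
        have hfr1 : (min b 0 - (k : Int)).toNat = 0 := by omega
        have hfr2 : (min b 0 - ((k : Int) + 1)).toNat = 0 := by omega
        have hmax1 : (max (k : Int) 0).toNat = k := by omega
        have hmax2 : (max ((k : Int) + 1) 0).toNat = k + 1 := by omega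
        have hb1 : max (k : Int) (seq.length : Int) = (seq.length : Int) := by omega
        have hb2 : max ((k : Int) + 1) (seq.length : Int) = (seq.length : Int) := by omega
        have htake : (min b (seq.length : Int) - (max (k : Int) 0)).toNat
            = (min b (seq.length : Int) - (max ((k : Int) + 1) 0)).toNat + 1 := by omega
        rw [hfr1, hfr2, hmax1, hmax2, hb1, hb2, htake]
        rw [List.drop_eq_getElem_cons hkL, List.take_succ_cons]
        simp
      · have hif : ¬(0 ≤ (k : Int) ∧ (k : Int) < (seq.length : Int)) := by
          push Not
          intro _
          exact_mod_cast Nat.le_of_not_lt hkL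
        rw [if_neg hif]
        have hfr1 : (min b 0 - (k : Int)).toNat = 0 := by omega
        have hfr2 : (min b 0 - ((k : Int) + 1)).toNat = 0 := by omega
        have hkL' : (seq.length : Int) ≤ (k : Int) := by exact_mod_cast Nat.le_of_not_lt hkL
        have hm1 : (min b (seq.length : Int) - max (k : Int) 0).toNat = 0 := by omega
        have hm2 : (min b (seq.length : Int) - max ((k : Int) + 1) 0).toNat = 0 := by omega
        have hbk1 : (b - max (k : Int) (seq.length : Int)).toNat
            = (b - max ((k : Int) + 1) (seq.length : Int)).toNat + 1 := by omega
        rw [hfr1, hfr2, hm1, hm2, hbk1, List.replicate_succ]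
        simp

-- A's motif equals the same normal form when the position is inside the window range
lemma pvMotifA_split (seq : List Char) (p : Int) (h1 : -7 ≤ p) (h2 : p ≤ (seq.length : Int) + 6) :
    pvMotifA seq p
    = List.replicate (min (p + 7) 0 - (p - 6)).toNat 'x'
      ++ (seq.drop (max (p - 6) 0).toNat).take (min (p + 7) (seq.length : Int) - max (p - 6) 0).toNat
      ++ List.replicate ((p + 7) - max (p - 6) (seq.length : Int)).toNat 'x' := by
  have hL : (0 : Int) ≤ (seq.length : Int) := Int.natCast_nonneg _
  rw [pvMotifA]
  simp only [PySem.List.pyRepeat_singleton]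
  have hslice : PySem.List.slice seq (some (max (p - 6) 0)) (some (min (p + 7) (seq.length : Int)))
      = (seq.drop (max (p - 6) 0).toNat).take
          ((min (p + 7) (seq.length : Int)).toNat - (max (p - 6) 0).toNat) := by
    rw [PySem.List.slice_toNat (a := max (p - 6) 0) (b := min (p + 7) (seq.length : Int))] <;> omega
  rw [hslice]
  have htake : (min (p + 7) (seq.length : Int)).toNat - (max (p - 6) 0).toNat
      = (min (p + 7) (seq.length : Int) - max (p - 6) 0).toNat := by omega
  rw [htake]
  have hfront : (if max (p - 6) 0 = 0 then List.replicate (6 - p).toNat 'x' else ([] : List Char))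
      = List.replicate (min (p + 7) 0 - (p - 6)).toNat 'x' := by
    by_cases h6 : max (p - 6) 0 = 0
    · rw [if_pos h6, show (6 - p).toNat = (min (p + 7) 0 - (p - 6)).toNat by omega]
    · rw [if_neg h6, show (min (p + 7) 0 - (p - 6)).toNat = 0 by omega, List.replicate_zero]
  have hback : (if min (p + 7) (seq.length : Int) - p < 7
        then List.replicate (6 - (min (p + 7) (seq.length : Int) - p - 1)).toNat 'x'
        else ([] : List Char))
      = List.replicate ((p + 7) - max (p - 6) (seq.length : Int)).toNat 'x' := by
    by_cases hE : min (p + 7) (seq.length : Int) - p < 7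
    · rw [if_pos hE, show (6 - (min (p + 7) (seq.length : Int) - p - 1)).toNat
          = ((p + 7) - max (p - 6) (seq.length : Int)).toNat by omega]
    · rw [if_neg hE, show ((p + 7) - max (p - 6) (seq.length : Int)).toNat = 0 by omega,
          List.replicate_zero]
  rw [hfront, hback]

lemma pvMotif_eq (seq : List Char) (p : Int) (h1 : -7 ≤ p) (h2 : p ≤ (seq.length : Int) + 6) :
    pvMotifA seq p = pvMotifB seq p := by
  rw [pvMotifA_split seq p h1 h2, pvMotifB]
  rw [pvWindow_split seq (p - 6) (p + 7)]

-- A's inner loop (modify the entry of the outer dict) = B's inner loop (build then insert once)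
lemma pvInner_eq (sid : String) (refs : List String)
    (F G : String → String) (h : ∀ s ∈ refs, F s = G s)
    (md : PySem.Dict String (PySem.Dict String String)) (inner : PySem.Dict String String) :
    refs.foldl
      (fun md s => md.modify sid PySem.Dict.empty (fun d => d.insert s (F s)))
      (md.insert sid inner)
    = md.insert sid (refs.foldl (fun d s => d.insert s (G s)) inner) := by
  induction refs generalizing inner with
  | nil => rfl
  | cons s rest ih =>
    simp only [List.foldl_cons]
    have hstep : (md.insert sid inner).modify sid PySem.Dict.empty
        (fun d => d.insert s (F s)) = md.insert sid (inner.insert s (F s)) := by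
      simp [PySem.Dict.modify, PySem.Dict.getD_insert_self, PySem.Dict.insert_insert_self]
    rw [hstep, h s (List.mem_cons_self), ih (fun t ht => h t (List.mem_cons_of_mem _ ht))]

-- ---- helpers for the tightness proof ----

-- the canonical per-key inner dict built with motif function `motif`
def pvInnerD (fd : PySem.Dict String String) (motif : List Char → Int → List Char)
    (kv : String × List String) : PySem.Dict String String :=
  kv.2.foldl
    (fun d s => d.insert s
      (String.ofList (motif ((fd.getD kv.1 "").toList) ((PySem.Int.ofStr? s).getD 0 - 1))))
    PySem.Dict.empty

-- a fold inserting per-pair fresh distinct keys appends its pairs to the items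
lemma pvOuterItems (l : List (String × List String))
    (g : (String × List String) → PySem.Dict String String)
    (d : PySem.Dict String (PySem.Dict String String))
    (hfresh : ∀ kv ∈ l, d.contains kv.1 = false) (hnd : (l.map (·.1)).Nodup) :
    (l.foldl (fun md kv => md.insert kv.1 (g kv)) d).items
      = d.items ++ l.map (fun kv => (kv.1, g kv)) := by
  induction l generalizing d with
  | nil => simp
  | cons kv rest ih =>
    simp only [List.map_cons, List.nodup_cons] at hnd
    simp only [List.foldl_cons, List.map_cons]
    rw [ih (d.insert kv.1 (g kv))
        (by
          intro kv' h'
          rw [PySem.Dict.contains_insert]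
          have hne : kv'.1 ≠ kv.1 := fun hfst => hnd.1 (hfst ▸ List.mem_map_of_mem h')
          simp [hne, hfresh kv' (List.mem_cons_of_mem _ h')])
        hnd.2]
    simp [PySem.Dict.items_insert, hfresh kv List.mem_cons_self]

-- the common canonical form of both outer loops
lemma pvCanonGen (l : List (String × List String))
    (g : (String × List String) → PySem.Dict String String) (hnd : (l.map (·.1)).Nodup) :
    (l.foldl (fun md kv => md.insert kv.1 (g kv)) PySem.Dict.empty).items.map
        (fun kv => (kv.1, kv.2.items))
      = l.map (fun kv => (kv.1, (g kv).items)) := by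
  rw [pvOuterItems l g PySem.Dict.empty (fun kv _ => PySem.Dict.contains_empty _) hnd]
  simp [List.map_map, Function.comp_def]
  rfl

-- both ports in canonical form: map over the phospho items of (key, inner items)
lemma pvCanonB (fasta_dict : List (String × String)) (phospho_dict : List (String × List String)) :
    make_motifs_dict_alt fasta_dict phospho_dict
      = (PySem.Dict.ofList phospho_dict).items.map
          (fun kv => (kv.1, (pvInnerD (PySem.Dict.ofList fasta_dict) pvMotifB kv).items)) := by
  exact pvCanonGen (PySem.Dict.ofList phospho_dict).items
    (pvInnerD (PySem.Dict.ofList fasta_dict) pvMotifB)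
    (PySem.Dict.nodup_keys_ofList phospho_dict)

lemma pvCanonA (fasta_dict : List (String × String)) (phospho_dict : List (String × List String)) :
    make_motifs_dict fasta_dict phospho_dict
      = (PySem.Dict.ofList phospho_dict).items.map
          (fun kv => (kv.1, (pvInnerD (PySem.Dict.ofList fasta_dict) pvMotifA kv).items)) := by
  unfold make_motifs_dict
  simp only []
  trans ((PySem.Dict.ofList phospho_dict).items.foldl
      (fun md kv => md.insert kv.1 (pvInnerD (PySem.Dict.ofList fasta_dict) pvMotifA kv))
      PySem.Dict.empty).items.map (fun kv => (kv.1, kv.2.items))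
  · apply congrArg (fun d : PySem.Dict String (PySem.Dict String String) =>
      d.items.map (fun kv => (kv.1, kv.2.items)))
    apply PySem.List.foldl_congr_mem'
    intro kv hkv md
    exact pvInner_eq kv.1 kv.2 _ _ (fun _ _ => rfl) md PySem.Dict.empty
  · exact pvCanonGen (PySem.Dict.ofList phospho_dict).items
      (pvInnerD (PySem.Dict.ofList fasta_dict) pvMotifA)
      (PySem.Dict.nodup_keys_ofList phospho_dict)

-- lookup in a fold of inserts whose value depends only on the key
lemma pvFoldGet (refs : List String) (F : String → String) (d : PySem.Dict String String)
    (s : String) :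
    (refs.foldl (fun d t => d.insert t (F t)) d).get? s
      = if s ∈ refs then some (F s) else d.get? s := by
  induction refs generalizing d with
  | nil => simp
  | cons t rest ih =>
    simp only [List.foldl_cons, ih]
    by_cases hs : s ∈ rest
    · simp [hs]
    · by_cases hst : s = t
      · subst hst
        simp [hs, PySem.Dict.get?_insert_self]
      · simp only [List.mem_cons, hs, hst, or_self, if_false]
        exact PySem.Dict.get?_insert_of_ne _ _ hst

lemma pvMotifB_len (seq : List Char) (p : Int) : (pvMotifB seq p).length = 13 := by
  rw [pvMotifB]
  rw [List.length_map, PySem.List.length_pyRange_one]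
  omega

lemma pvMotifA_len_ge (seq : List Char) (p : Int)
    (h : p ≤ -8 ∨ (seq.length : Int) + 7 ≤ p) : 14 ≤ (pvMotifA seq p).length := by
  have hL : (0 : Int) ≤ (seq.length : Int) := Int.natCast_nonneg _
  rw [pvMotifA]
  simp only [PySem.List.pyRepeat_singleton, List.length_append]
  rcases h with h | h
  · rw [if_pos (show max (p - 6) 0 = 0 by omega)]
    rw [List.length_replicate]
    omega
  · rw [if_neg (show ¬ max (p - 6) 0 = 0 by omega)]
    rw [if_pos (show min (p + 7) (seq.length : Int) - p < 7 by omega)]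
    rw [List.length_replicate]
    have : 14 ≤ (6 - (min (p + 7) (seq.length : Int) - p - 1)).toNat := by omega
    omega

-- ===== VERDICT (by name: the statement is the Claim_ definition above) =====
theorem make_motifs_dict_spec : Claim_unchanged_make_motifs_dict := by
  intro fasta_dict phospho_dict _ hpre
  unfold Spec_make_motifs_dict
  intro hnd
  rw [Pre_make_motifs_dict, pvPreCheck] at hpre
  simp only [List.all_eq_true] at hpre
  rw [D_make_motifs_dict, pvDCheck] at hnd
  simp only [List.any_eq_true, not_exists] at hnd
  unfold make_motifs_dict make_motifs_dict_alt
  simp only []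
  apply congrArg (fun d : PySem.Dict String (PySem.Dict String String) =>
    d.items.map (fun kv => (kv.1, kv.2.items)))
  apply PySem.List.foldl_congr_mem'
  intro kv hkv md
  refine pvInner_eq kv.1 kv.2
    (fun s => String.ofList (pvMotifA ((PySem.Dict.ofList fasta_dict).getD kv.1 "").toList
      ((PySem.Int.ofStr? s).getD 0 - 1)))
    (fun s => String.ofList (pvMotifB ((PySem.Dict.ofList fasta_dict).getD kv.1 "").toList
      ((PySem.Int.ofStr? s).getD 0 - 1)))
    ?_ md PySem.Dict.empty
  intro s hs
  have hok := hpre kv hkv s hs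
  have hbad : ¬ pvBadPos (PySem.Dict.ofList fasta_dict) kv.1 s = true := by
    intro hb
    exact hnd kv ⟨hkv, s, hs, hb⟩
  unfold pvOkRef at hok
  rw [Bool.and_eq_true] at hok
  obtain ⟨v, hv⟩ := Option.isSome_iff_exists.mp hok.2
  unfold pvBadPos at hbad
  rw [hv] at hbad
  rw [hok.1] at hbad
  simp only [Bool.true_and, Bool.or_eq_true, decide_eq_true_eq] at hbad
  push Not at hbad
  simp only [hv, Option.getD_some]
  exact congrArg String.ofList (pvMotif_eq _ _ (by omega) (by omega))

theorem make_motifs_dict_changed : Claim_changed_make_motifs_dict := by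
  unfold Claim_changed_make_motifs_dict; decide

theorem make_motifs_dict_tight : Claim_exact_make_motifs_dict := by
  intro fasta_dict phospho_dict _ _ hD heq
  rw [D_make_motifs_dict, pvDCheck] at hD
  simp only [List.any_eq_true] at hD
  obtain ⟨kv, hkv, s, hs, hb⟩ := hD
  rw [pvBadPos, Bool.and_eq_true] at hb
  obtain ⟨-, hb2⟩ := hb
  rcases hofs : PySem.Int.ofStr? s with _ | v
  · rw [hofs] at hb2; simp at hb2
  rw [hofs] at hb2
  simp only [Bool.or_eq_true, decide_eq_true_eq] at hb2
  rw [pvCanonA, pvCanonB, List.map_inj_left] at heq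
  have hitems := congrArg Prod.snd (heq kv hkv)
  have hdict : pvInnerD (PySem.Dict.ofList fasta_dict) pvMotifA kv
      = pvInnerD (PySem.Dict.ofList fasta_dict) pvMotifB kv := PySem.Dict.ext hitems
  have hga := pvFoldGet kv.2
    (fun t => String.ofList (pvMotifA (((PySem.Dict.ofList fasta_dict).getD kv.1 "").toList)
      ((PySem.Int.ofStr? t).getD 0 - 1))) PySem.Dict.empty s
  have hgb := pvFoldGet kv.2
    (fun t => String.ofList (pvMotifB (((PySem.Dict.ofList fasta_dict).getD kv.1 "").toList)
      ((PySem.Int.ofStr? t).getD 0 - 1))) PySem.Dict.empty s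
  rw [if_pos hs] at hga hgb
  have hget : (pvInnerD (PySem.Dict.ofList fasta_dict) pvMotifA kv).get? s
      = (pvInnerD (PySem.Dict.ofList fasta_dict) pvMotifB kv).get? s := by rw [hdict]
  rw [pvInnerD, pvInnerD, hga, hgb, Option.some_inj] at hget
  have hlist := congrArg String.toList hget
  simp only [String.toList_ofList] at hlist
  have hlen := congrArg List.length hlist
  rw [pvMotifB_len, hofs] at hlen
  simp only [Option.getD_some] at hlen
  have h14 := pvMotifA_len_ge (((PySem.Dict.ofList fasta_dict).getD kv.1 "").toList) (v - 1)
    (by omega)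
  omega
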